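-- pv_equiv track=rewrite | github.com/jaros1024/psi-project | lib/converters.py | __get_diastolic_points
-- ===== SOURCE A (Python) =====
-- def __get_diastolic_points(extremes):
--     diastolic_points = []
--
--     minima = []
--     for i in extremes:
--         if i[2] == "min":
--             if i[1] < -2:
--                 minima.append(i)
--         else:
--             if i[1] > 0:
--                 point = __get_lowest_min(minima)
--                 if point is not None:
--                     diastolic_points.append(point)
--                 minima.clear()
--
--     return diastolic_points
--
-- def __get_lowest_min(minima):
--     lowest = (0, 999)
--
--     for i in minima:
--         if i[1] < lowest[1]:
--             lowest = (i[0], i[1])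
--
--     if lowest[1] < 0:
--         return lowest
--     return None
-- ===== SOURCE B (Python) =====
-- def __get_diastolic_points(extremes):
--     result = []
--     best = None
--     for x in extremes:
--         if x[2] == "min":
--             if x[1] < -2 and (best is None or x[1] < best[1]):
--                 best = (x[0], x[1])
--         elif x[1] > 0:
--             if best is not None:
--                 result.append(best)
--             best = None
--     return result
-- ===== Notes on version B (the rewrite author's own statement) =====
-- stated objective: simpler
-- what changed: Replaces the accumulated minima list plus the __get_lowest_min scan with a single running best-minimum Option that is updated in place and flushed on each positive non-min element, removing the helper and the inner rescan.
import Mathlib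
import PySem

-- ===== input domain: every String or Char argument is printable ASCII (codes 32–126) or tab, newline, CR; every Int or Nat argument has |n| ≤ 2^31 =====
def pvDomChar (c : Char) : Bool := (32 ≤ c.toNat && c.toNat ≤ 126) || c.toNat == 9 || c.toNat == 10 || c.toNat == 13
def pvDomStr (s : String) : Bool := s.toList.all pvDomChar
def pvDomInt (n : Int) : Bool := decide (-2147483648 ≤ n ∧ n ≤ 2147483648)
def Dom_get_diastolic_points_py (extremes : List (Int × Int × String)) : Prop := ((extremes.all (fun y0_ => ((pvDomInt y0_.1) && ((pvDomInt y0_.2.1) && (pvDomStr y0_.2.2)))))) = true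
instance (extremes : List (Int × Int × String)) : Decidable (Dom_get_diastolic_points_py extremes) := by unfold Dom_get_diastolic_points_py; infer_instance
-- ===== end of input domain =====

-- B replaces the accumulated minima list + __get_lowest_min rescan with one running best-minimum Option (simpler decomposition, same results).
-- ===== PORT A =====
-- helper __get_lowest_min
def get_lowest_min (minima : List (Int × Int × String)) : Option (Int × Int) :=
  let lowest := minima.foldl (fun l i => if i.2.1 < l.2 then (i.1, i.2.1) else l) ((0 : Int), (999 : Int))
  if lowest.2 < 0 then some lowest else none

def stepA (s : List (Int × Int) × List (Int × Int × String)) (i : Int × Int × String) :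
    List (Int × Int) × List (Int × Int × String) :=
  if i.2.2 = "min" then
    (if i.2.1 < -2 then (s.1, s.2 ++ [i]) else s)
  else
    if i.2.1 > 0 then
      ((match get_lowest_min s.2 with
        | some p => s.1 ++ [p]
        | none => s.1), [])
    else s

def get_diastolic_points_py (extremes : List (Int × Int × String)) : List (Int × Int) :=
  (extremes.foldl stepA ([], [])).1

-- ===== PORT B =====
def stepB (s : List (Int × Int) × Option (Int × Int)) (x : Int × Int × String) :
    List (Int × Int) × Option (Int × Int) :=
  if x.2.2 = "min" then
    -- x[1] < -2 and (best is None or x[1] < best[1])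
    (if x.2.1 < -2 then
      match s.2 with
      | none => (s.1, some (x.1, x.2.1))
      | some p => if x.2.1 < p.2 then (s.1, some (x.1, x.2.1)) else s
    else s)
  else
    if x.2.1 > 0 then
      ((match s.2 with | some p => s.1 ++ [p] | none => s.1), none)
    else s

def get_diastolic_points_py_alt (extremes : List (Int × Int × String)) : List (Int × Int) :=
  (extremes.foldl stepB ([], none)).1

-- ===== PRECONDITION & SPEC =====
def Spec_get_diastolic_points_py (extremes : List (Int × Int × String)) (out : List (Int × Int)) : Prop := out = get_diastolic_points_py_alt extremes
instance (extremes : List (Int × Int × String)) (out : List (Int × Int)) : Decidable (Spec_get_diastolic_points_py extremes out) := by unfold Spec_get_diastolic_points_py; infer_instance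

-- ===== CLAIM (what is proved, stated in full; the proofs are below) =====
def Claim_equal_get_diastolic_points_py : Prop := ∀ (extremes : List (Int × Int × String)), Dom_get_diastolic_points_py extremes → Spec_get_diastolic_points_py extremes (get_diastolic_points_py extremes)

-- ===== LEMMAS AND PROOFS =====
-- DPInvariant relating A's accumulated minima list to B's running best.
def DPInv (minima : List (Int × Int × String)) (best : Option (Int × Int)) : Prop :=
  let L := minima.foldl (fun l i => if i.2.1 < l.2 then (i.1, i.2.1) else l) ((0 : Int), (999 : Int))
  match best with
  | none => L = ((0 : Int), (999 : Int))
  | some p => L = p ∧ p.2 < -2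

lemma loop_eq (extremes : List (Int × Int × String)) :
    ∀ (dias : List (Int × Int)) (minima : List (Int × Int × String)) (best : Option (Int × Int)),
      DPInv minima best →
      (extremes.foldl stepA (dias, minima)).1 = (extremes.foldl stepB (dias, best)).1 := by
  induction extremes with
  | nil => intro dias minima best _; rfl
  | cons i rest ih =>
    intro dias minima best hinv
    simp only [List.foldl_cons]
    by_cases hmin : i.2.2 = "min"
    · by_cases hlt : i.2.1 < -2
      · -- both may update; show DPInv (minima ++ [i]) best'
        have hL : (minima ++ [i]).foldl (fun l j => if j.2.1 < l.2 then (j.1, j.2.1) else l)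
            ((0 : Int), (999 : Int))
            = (if i.2.1 < (minima.foldl (fun l j => if j.2.1 < l.2 then (j.1, j.2.1) else l)
                ((0 : Int), (999 : Int))).2 then (i.1, i.2.1)
               else minima.foldl (fun l j => if j.2.1 < l.2 then (j.1, j.2.1) else l)
                ((0 : Int), (999 : Int))) := by
          simp [List.foldl_append]
        cases hbest : best with
        | none =>
          simp only [DPInv, hbest] at hinv
          have hstepA : stepA (dias, minima) i = (dias, minima ++ [i]) := by
            simp [stepA, hmin, hlt]
          have hstepB : stepB (dias, none) i = (dias, some (i.1, i.2.1)) := by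
            simp [stepB, hmin, hlt]
          rw [hstepA, hstepB]
          apply ih
          simp only [DPInv]
          constructor
          · rw [hL, hinv]; simp; omega
          · exact hlt
        | some p =>
          simp only [DPInv, hbest] at hinv
          obtain ⟨hLp, hp2⟩ := hinv
          have hstepA : stepA (dias, minima) i = (dias, minima ++ [i]) := by
            simp [stepA, hmin, hlt]
          rw [hstepA]
          by_cases hlt2 : i.2.1 < p.2
          · have hstepB : stepB (dias, some p) i = (dias, some (i.1, i.2.1)) := by
              simp [stepB, hmin, hlt, hlt2]
            rw [hstepB]
            apply ih
            simp only [DPInv]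
            refine ⟨?_, hlt⟩
            rw [hL, hLp]; simp [hlt2]
          · have hstepB : stepB (dias, some p) i = (dias, some p) := by
              simp [stepB, hmin, hlt, hlt2]
            rw [hstepB]
            apply ih
            simp only [DPInv]
            refine ⟨?_, hp2⟩
            rw [hL, hLp]; simp [hlt2]
      · -- nothing changes
        have hstepA : stepA (dias, minima) i = (dias, minima) := by
          simp [stepA, hmin, hlt]
        have hstepB : stepB (dias, best) i = (dias, best) := by
          cases best <;> simp [stepB, hmin, hlt]
        rw [hstepA, hstepB]; exact ih dias minima best hinv
    · by_cases hpos : i.2.1 > 0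
      · cases hbest : best with
        | none =>
          simp only [DPInv, hbest] at hinv
          have hlow : get_lowest_min minima = none := by
            simp [get_lowest_min, hinv]
          have hstepA : stepA (dias, minima) i = (dias, []) := by
            simp [stepA, hmin, hpos, hlow]
          have hstepB : stepB (dias, none) i = (dias, none) := by
            simp [stepB, hmin, hpos]
          rw [hstepA, hstepB]
          apply ih
          simp [DPInv]
        | some p =>
          simp only [DPInv, hbest] at hinv
          obtain ⟨hLp, hp2⟩ := hinv
          have hlow : get_lowest_min minima = some p := by
            simp only [get_lowest_min, hLp]
            have : p.2 < 0 := by omega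
            simp [this]
          have hstepA : stepA (dias, minima) i = (dias ++ [p], []) := by
            simp [stepA, hmin, hpos, hlow]
          have hstepB : stepB (dias, some p) i = (dias ++ [p], none) := by
            simp [stepB, hmin, hpos]
          rw [hstepA, hstepB]
          apply ih
          simp [DPInv]
      · have hstepA : stepA (dias, minima) i = (dias, minima) := by
          simp [stepA, hmin, hpos]
        have hstepB : stepB (dias, best) i = (dias, best) := by
          cases best <;> simp [stepB, hmin, hpos]
        rw [hstepA, hstepB]; exact ih dias minima best hinv

-- ===== VERDICT (by name: the statement is the Claim_ definition above) =====
theorem get_diastolic_points_py_spec : Claim_equal_get_diastolic_points_py := by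
  intro extremes _
  unfold Spec_get_diastolic_points_py get_diastolic_points_py get_diastolic_points_py_alt
  exact loop_eq extremes [] [] none (by simp [DPInv])
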